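-- pv_equiv track=rewrite | github.com/navetech/work | first-625-words/mysite/first625words/views-v1.py | calc_rows_images_and_languages_counting
-- ===== SOURCE A (Python) =====
-- def calc_rows_images_and_languages_counting(rows):
--     counting = {}
--     counting['images'] = []
--     counting['languages'] = []
--
--     images_count_max = 0
--     languages_count_max = 0
--
--     for row in rows:
--         images_count = len(row['images'])
--         if images_count > images_count_max:
--             images_count_max = images_count
--
--             counting['images'] = row['images']
--
--         languages_count = len(row['languages_phrases'])
--         if languages_count > languages_count_max:
--             languages_count_max = languages_count
--
--             counting['languages'] = list(range(languages_count_max))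
--
--     return counting
-- ===== SOURCE B (Python) =====
-- def calc_rows_images_and_languages_counting(rows):
--     rows = list(rows)
--     if not rows:
--         return {'images': [], 'languages': []}
--     top_images = sorted(rows, key=lambda r: len(r['images']), reverse=True)[0]
--     top_langs = sorted(rows, key=lambda r: len(r['languages_phrases']), reverse=True)[0]
--     return {
--         'images': top_images['images'],
--         'languages': list(range(len(top_langs['languages_phrases']))),
--     }
-- ===== Notes on version B (the rewrite author's own statement) =====
-- stated objective: alternative
-- what changed: Replaces A's single-pass running-max loop over a mutable dict by two stable descending sorts (by images length and by languages_phrases length) whose heads yield the chosen rows; sort stability reproduces A's first-on-ties strict-update rule.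
import Mathlib
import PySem

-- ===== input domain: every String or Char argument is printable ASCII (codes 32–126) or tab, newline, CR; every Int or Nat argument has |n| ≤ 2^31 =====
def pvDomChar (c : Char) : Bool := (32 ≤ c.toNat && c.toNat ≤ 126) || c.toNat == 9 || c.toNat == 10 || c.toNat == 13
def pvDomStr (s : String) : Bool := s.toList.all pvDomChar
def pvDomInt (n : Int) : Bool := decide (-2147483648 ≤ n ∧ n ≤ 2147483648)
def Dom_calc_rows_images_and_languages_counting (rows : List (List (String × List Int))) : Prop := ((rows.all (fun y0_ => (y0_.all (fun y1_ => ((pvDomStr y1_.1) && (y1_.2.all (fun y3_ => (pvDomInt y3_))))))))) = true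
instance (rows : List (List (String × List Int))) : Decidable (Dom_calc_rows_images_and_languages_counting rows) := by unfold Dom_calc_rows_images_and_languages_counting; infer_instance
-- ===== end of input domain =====

-- B replaces A's running-max loop by two stable descending sorts whose heads yield the chosen rows
-- (stability reproduces A's first-on-ties rule); alternative decomposition, same result, O(n log n) not faster.


-- ===== PORT A =====
-- row['images'] / row['languages_phrases'] (Python raises KeyError when absent; Pre_ excludes that,
-- the `.getD []` default is never reached on Pre_)
def pvImgs (row : List (String × List Int)) : List Int :=
  ((PySem.Dict.mk row).get? "images").getD []

def pvLangs (row : List (String × List Int)) : List Int :=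
  ((PySem.Dict.mk row).get? "languages_phrases").getD []

-- one iteration of A's `for row in rows` loop; state = (counting, images_count_max, languages_count_max)
def pvStepA (st : PySem.Dict String (List Int) × Int × Int) (row : List (String × List Int)) :
    PySem.Dict String (List Int) × Int × Int :=
  let imagesCount : Int := ((pvImgs row).length : Int)
  let c1 := if st.2.1 < imagesCount then st.1.insert "images" (pvImgs row) else st.1
  let im1 := if st.2.1 < imagesCount then imagesCount else st.2.1
  let languagesCount : Int := ((pvLangs row).length : Int)
  let c2 := if st.2.2 < languagesCount then c1.insert "languages" (PySem.List.pyRange 0 languagesCount 1) else c1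
  let lm1 := if st.2.2 < languagesCount then languagesCount else st.2.2
  (c2, im1, lm1)

def calc_rows_images_and_languages_counting (rows : List (List (String × List Int))) : List (String × List Int) :=
  let counting : PySem.Dict String (List Int) :=
    (PySem.Dict.empty.insert "images" ([] : List Int)).insert "languages" []
  (rows.foldl pvStepA (counting, 0, 0)).1.items

-- ===== PORT B =====
-- B sorts rows (stable, descending) by each length key and takes the head; the `.getD []` default on
-- head? is unreachable in the nonempty branch (sorted of a nonempty list is nonempty).
def calc_rows_images_and_languages_counting_alt (rows : List (List (String × List Int))) : List (String × List Int) :=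
  if rows = [] then [("images", ([] : List Int)), ("languages", ([] : List Int))]
  else
    let topImages := ((PySem.List.sorted rows (fun r => ((pvImgs r).length : Int)) true).head?).getD []
    let topLangs := ((PySem.List.sorted rows (fun r => ((pvLangs r).length : Int)) true).head?).getD []
    [("images", pvImgs topImages),
     ("languages", PySem.List.pyRange 0 ((pvLangs topLangs).length : Int) 1)]

-- ===== PRECONDITION & SPEC =====
-- Pre_: every row carries both keys — Python A raises KeyError on a row missing 'images' or 'languages_phrases'.
def Pre_calc_rows_images_and_languages_counting (rows : List (List (String × List Int))) : Prop :=
  ∀ row ∈ rows, ((PySem.Dict.mk row).get? "images").isSome ∧ ((PySem.Dict.mk row).get? "languages_phrases").isSome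

instance (rows : List (List (String × List Int))) : Decidable (Pre_calc_rows_images_and_languages_counting rows) := by
  unfold Pre_calc_rows_images_and_languages_counting; infer_instance

def pvWitness_calc_rows_images_and_languages_counting : (List (List (String × List Int))) :=
  ([[("images", [1, 2]), ("languages_phrases", [7])], [("images", []), ("languages_phrases", [3, 4, 5])]])

def Spec_calc_rows_images_and_languages_counting (rows : List (List (String × List Int))) (out : List (String × List Int)) : Prop := out = calc_rows_images_and_languages_counting_alt rows
instance (rows : List (List (String × List Int))) (out : List (String × List Int)) : Decidable (Spec_calc_rows_images_and_languages_counting rows out) := by unfold Spec_calc_rows_images_and_languages_counting; infer_instance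

-- ===== CLAIM (what is proved, stated in full; the proofs are below) =====
def Claim_equal_calc_rows_images_and_languages_counting : Prop := ∀ (rows : List (List (String × List Int))), Dom_calc_rows_images_and_languages_counting rows → Pre_calc_rows_images_and_languages_counting rows → Spec_calc_rows_images_and_languages_counting rows (calc_rows_images_and_languages_counting rows)

-- ===== LEMMAS AND PROOFS =====

-- closed forms of A's two interleaved record-keeping folds
def pvBestI (rows : List (List (String × List Int))) (I : List Int) : List Int :=
  rows.foldl (fun acc r => if (acc.length : Int) < ((pvImgs r).length : Int) then pvImgs r else acc) I

def pvMaxL (rows : List (List (String × List Int))) (lm : Int) : Int :=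
  rows.foldl (fun acc r => if acc < ((pvLangs r).length : Int) then ((pvLangs r).length : Int) else acc) lm

lemma pvLoopA_closed (rows : List (List (String × List Int))) :
    ∀ (I : List Int) (lm : Int),
    rows.foldl pvStepA
      (PySem.Dict.mk [("images", I), ("languages", PySem.List.pyRange 0 lm 1)], (I.length : Int), lm)
    = (PySem.Dict.mk [("images", pvBestI rows I),
        ("languages", PySem.List.pyRange 0 (pvMaxL rows lm) 1)],
        ((pvBestI rows I).length : Int), pvMaxL rows lm) := by
  induction rows with
  | nil => intro I lm; simp [pvBestI, pvMaxL]
  | cons r rs ih =>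
    intro I lm
    have hstep : pvStepA
        (PySem.Dict.mk [("images", I), ("languages", PySem.List.pyRange 0 lm 1)], (I.length : Int), lm) r
      = (PySem.Dict.mk [("images", if (I.length : Int) < ((pvImgs r).length : Int) then pvImgs r else I),
          ("languages", PySem.List.pyRange 0 (if lm < ((pvLangs r).length : Int) then ((pvLangs r).length : Int) else lm) 1)],
          ((if (I.length : Int) < ((pvImgs r).length : Int) then pvImgs r else I).length : Int),
          (if lm < ((pvLangs r).length : Int) then ((pvLangs r).length : Int) else lm)) := by
      simp only [pvStepA, PySem.Dict.insert, PySem.Dict.contains]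
      split_ifs <;> simp_all
    simp only [List.foldl_cons, hstep, ih, pvBestI, pvMaxL]

-- Python's first-max update step, named so the folds below are syntactically shared
def pvStepMax {α : Type} (key : α → Int) (o : Option α) (x : α) : Option α :=
  match o with
  | none => some x
  | some m => if key m < key x then some x else some m

lemma pvMax?_eq_foldl_step {α : Type} (key : α → Int) (xs : List α) :
    PySem.List.max? xs key = xs.foldl (pvStepMax key) none := by
  unfold PySem.List.max?
  congr 1

-- head of a descending stable insertion: exactly the first-max update rule
lemma pvHead?_insertBy {α : Type} (key : α → Int) (x : α) (acc : List α) :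
    (PySem.List.insertBy (fun a b => decide (key b < key a)) x acc).head?
    = some (match acc.head? with
        | none => x
        | some m => if key m < key x then x else m) := by
  cases acc with
  | nil => rfl
  | cons y ys =>
    simp only [PySem.List.insertBy]
    split_ifs with h <;> simp_all

-- head of the whole insertBy-fold = Python's first-max fold
lemma pvHead?_foldl_ins {α : Type} (key : α → Int) :
    ∀ (xs acc : List α),
    (xs.foldl (fun acc x => PySem.List.insertBy (fun a b => decide (key b < key a)) x acc) acc).head?
    = xs.foldl (pvStepMax key) acc.head? := by
  intro xs
  induction xs with
  | nil => intro acc; rfl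
  | cons x t ih =>
    intro acc
    simp only [List.foldl_cons]
    rw [ih, pvHead?_insertBy]
    cases acc.head? with
    | none => rfl
    | some m => by_cases h : key m < key x <;> simp [pvStepMax, h]

-- sorted(…, reverse=True)[0] is the FIRST maximal element (max?)
lemma pvHead?_sorted_rev {α : Type} (key : α → Int) (xs : List α) :
    (PySem.List.sorted xs key true).head? = PySem.List.max? xs key := by
  rw [PySem.List.sorted_rev_eq_foldl_insertBy, pvHead?_foldl_ins, pvMax?_eq_foldl_step]
  rfl

-- `max?` on a cons, for an Int-valued key (first maximal element wins)
lemma pvMax?_cons {α : Type} (key : α → Int) (r : α) (rs : List α) :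
    PySem.List.max? (r :: rs) key
    = some (match PySem.List.max? rs key with
        | none => r
        | some m => if key r < key m then m else r) := by
  induction rs generalizing r with
  | nil => rfl
  | cons x t ih =>
    show PySem.List.max? (r :: x :: t) key = _
    have h1 : PySem.List.max? (r :: x :: t) key
        = PySem.List.max? ((if key r < key x then x else r) :: t) key := by
      simp only [PySem.List.max?, List.foldl_cons]
      split_ifs <;> rfl
    rw [h1, ih, ih]
    rcases hmt : PySem.List.max? t key with _ | m
    · by_cases hrx : key r < key x <;> simp [hrx]
    · by_cases hrx : key r < key x <;> by_cases hxm : key x < key m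
      · have hrm : key r < key m := by omega
        simp [hrx, hxm, hrm]
      · simp [hrx, hxm]
      · simp [hrx, hxm]
      · have hrm : ¬ key r < key m := by omega
        simp [hrx, hxm, hrm]

lemma pvBestI_spec (rows : List (List (String × List Int))) :
    ∀ (I : List Int),
    pvBestI rows I
    = match PySem.List.max? rows (fun r => ((pvImgs r).length : Int)) with
      | none => I
      | some m => if (I.length : Int) < ((pvImgs m).length : Int) then pvImgs m else I := by
  induction rows with
  | nil => intro I; rfl
  | cons r rs ih =>
    intro I
    have hcons := pvMax?_cons (fun r => ((pvImgs r).length : Int)) r rs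
    have hI : pvBestI (r :: rs) I
        = pvBestI rs (if (I.length : Int) < ((pvImgs r).length : Int) then pvImgs r else I) := rfl
    rw [hI, ih, hcons]
    rcases hm : PySem.List.max? rs (fun r => ((pvImgs r).length : Int)) with _ | m
    · by_cases hIr : (I.length : Int) < ((pvImgs r).length : Int) <;> simp [hIr]
    · by_cases hIr : (I.length : Int) < ((pvImgs r).length : Int) <;>
        by_cases hrm : ((pvImgs r).length : Int) < ((pvImgs m).length : Int)
      · have hIm : (I.length : Int) < ((pvImgs m).length : Int) := by omega
        simp [hIr, hrm, hIm]
      · simp [hIr, hrm]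
      · simp [hIr, hrm]
      · have hIm : ¬ (I.length : Int) < ((pvImgs m).length : Int) := by omega
        simp [hIr, hrm, hIm]

-- the key of the first-max element equals the running max of the keys
lemma pvKey_max? {α : Type} (key : α → Int) :
    ∀ (xs : List α) (m m' : α),
    xs.foldl (pvStepMax key) (some m) = some m'
    → key m' = (xs.map key).foldl max (key m) := by
  intro xs
  induction xs with
  | nil => intro m m' h; simp_all
  | cons x t ih =>
    intro m m' h
    simp only [List.foldl_cons, List.map_cons, pvStepMax] at h ⊢
    by_cases hx : key m < key x
    · simp only [hx, if_pos] at h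
      rw [ih x m' h, max_eq_right (le_of_lt hx)]
    · simp only [hx, if_neg, not_false_iff] at h
      rw [ih m m' h, max_eq_left (by omega)]

lemma pvMaxL_eq_foldl (rows : List (List (String × List Int))) :
    ∀ lm : Int, pvMaxL rows lm = ((rows.map (fun r => ((pvLangs r).length : Int))).foldl max lm) := by
  induction rows with
  | nil => intro lm; rfl
  | cons r rs ih =>
    intro lm
    have : (if lm < ((pvLangs r).length : Int) then ((pvLangs r).length : Int) else lm)
        = max lm ((pvLangs r).length : Int) := by
      rcases max_cases lm ((pvLangs r).length : Int) with ⟨h1, h2⟩ | ⟨h1, h2⟩ <;> split_ifs <;> omega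
    simp only [pvMaxL, List.foldl_cons, List.map_cons] at *
    rw [this, ih]

-- ===== VERDICT (by name: the statement is the Claim_ definition above) =====
theorem calc_rows_images_and_languages_counting_spec : Claim_equal_calc_rows_images_and_languages_counting := by
  intro rows _ _
  unfold Spec_calc_rows_images_and_languages_counting
  simp only [calc_rows_images_and_languages_counting, calc_rows_images_and_languages_counting_alt]
  have hinit : ((PySem.Dict.empty.insert "images" ([] : List Int)).insert "languages" [])
      = PySem.Dict.mk [("images", ([] : List Int)), ("languages", PySem.List.pyRange 0 0 1)] := by decide
  rw [hinit]
  have h := pvLoopA_closed rows [] 0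
  simp only [List.length_nil, Nat.cast_zero] at h
  rw [h]
  cases rows with
  | nil => decide
  | cons r rs =>
    simp only [reduceCtorEq, if_false]
    rw [pvHead?_sorted_rev, pvHead?_sorted_rev]
    -- images component
    have hb := pvBestI_spec (r :: rs) []
    rcases hmI : PySem.List.max? (r :: rs) (fun r => ((pvImgs r).length : Int)) with _ | mI
    · exact absurd hmI (by simp [PySem.List.max?_eq_none_iff])
    rw [hmI] at hb
    simp only [List.length_nil, Nat.cast_zero] at hb
    have himg : pvBestI (r :: rs) [] = pvImgs mI := by
      by_cases h0 : (0 : Int) < ((pvImgs mI).length : Int)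
      · simp [hb]
      · have hz : (pvImgs mI) = [] := by
          have : (pvImgs mI).length = 0 := by omega
          exact List.length_eq_zero_iff.mp this
        simp [hb, hz]
    -- languages component
    rcases hmL : PySem.List.max? (r :: rs) (fun r => ((pvLangs r).length : Int)) with _ | mL
    · exact absurd hmL (by simp [PySem.List.max?_eq_none_iff])
    have hml : ((pvLangs mL).length : Int)
        = ((rs.map (fun r => ((pvLangs r).length : Int))).foldl max ((pvLangs r).length : Int)) := by
      rw [pvMax?_eq_foldl_step] at hmL
      simp only [List.foldl_cons, pvStepMax] at hmL
      exact pvKey_max? (fun r => ((pvLangs r).length : Int)) rs r mL hmL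
    have hmaxl : pvMaxL (r :: rs) 0 = ((pvLangs mL).length : Int) := by
      rw [pvMaxL_eq_foldl, hml]
      simp only [List.map_cons, List.foldl_cons]
      rw [max_eq_right (by positivity)]
    simp [himg, hmaxl]
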